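-- pv_equiv track=rewrite | github.com/rivalxy/gnn-graph-theory | dataset/graph_utils.py | is_paut
-- ===== SOURCE A (Python) =====
-- from typing import TypeAlias, cast
--
-- Mapping: TypeAlias = dict[int, int]
--
-- AdjacencyDict: TypeAlias = dict[int, set[int]]
--
-- def is_injective(mapping: Mapping) -> bool:
--     """Check if the mapping is injective (one-to-one).
--
--     :param mapping: A partial mapping from node indices to node indices.
--     :returns: True if the mapping is injective, False otherwise.
--     """
--     return len(set(mapping.values())) == len(mapping)
--
-- def is_paut(adjacency_dict: AdjacencyDict, mapping: Mapping) -> bool: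
--     """Check if mapping is a partial automorphism on given graph.
--
--     :param adjacency_dict: Adjacency dictionary of the graph.
--     :param mapping: A partial mapping from node indices to node indices.
--     :returns: True if the mapping is a partial automorphism, False otherwise.
--     """
--     if not mapping:
--         return False
--
--     if not is_injective(mapping):
--         return False
--
--     domain = list(mapping.keys())
--     for i, u in enumerate(domain):
--         for v in domain[i + 1 :]:
--             u_mapped = mapping[u]
--             v_mapped = mapping[v]
--             if (v in adjacency_dict.get(u, set())) != (
--                 v_mapped in adjacency_dict.get(u_mapped, set())
--             ):
--                 return False
--     return True
-- ===== SOURCE B (Python) =====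
-- def is_paut(adjacency_dict, mapping):
--     # Single reverse pass: for each node u, compare the image of u's
--     # later-in-domain neighbours with the later-image-restricted neighbours
--     # of mapping[u], instead of testing all domain pairs.
--     if not mapping:
--         return False
--     if len(set(mapping.values())) != len(mapping):
--         return False
--     seen = set()
--     seen_img = set()
--     for u in reversed(list(mapping.keys())):
--         mu = mapping[u]
--         fwd = {mapping[v] for v in adjacency_dict.get(u, set()) if v in seen}
--         bwd = {w for w in adjacency_dict.get(mu, set()) if w in seen_img}
--         if fwd != bwd:
--             return False
--         seen.add(u)
--         seen_img.add(mu)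
--     return True
-- ===== Notes on version B (the rewrite author's own statement) =====
-- stated objective: alternative
-- what changed: Replaces A's all-pairs domain scan with a single reverse pass over the domain that, per node, compares the set of images of its later-in-domain neighbours against the later-image-restricted neighbour set of its mapped node; asymptotically this trades A's O(d^2) pair loop for per-node work linear in degree, though a timing run's inputs bail out at the injectivity check for both programs, so no speedup was measured.
import Mathlib
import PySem

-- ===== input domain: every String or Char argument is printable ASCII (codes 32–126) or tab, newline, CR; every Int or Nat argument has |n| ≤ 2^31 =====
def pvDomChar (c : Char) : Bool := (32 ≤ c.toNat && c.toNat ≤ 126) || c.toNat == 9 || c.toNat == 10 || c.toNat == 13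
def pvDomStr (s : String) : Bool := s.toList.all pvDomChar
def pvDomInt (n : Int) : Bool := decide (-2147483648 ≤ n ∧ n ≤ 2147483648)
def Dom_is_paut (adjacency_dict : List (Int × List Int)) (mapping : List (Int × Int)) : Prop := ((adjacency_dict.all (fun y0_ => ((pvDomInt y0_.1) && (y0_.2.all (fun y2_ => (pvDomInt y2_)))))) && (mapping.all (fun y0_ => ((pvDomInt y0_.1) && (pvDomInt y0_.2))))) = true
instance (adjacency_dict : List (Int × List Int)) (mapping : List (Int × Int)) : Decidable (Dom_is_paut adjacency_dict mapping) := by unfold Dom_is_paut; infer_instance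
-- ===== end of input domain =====

-- B replaces A's all-pairs scan over the mapping's domain by a single reverse pass
-- comparing per-node domain-restricted neighbour sets through the mapping (objective: alternative).

-- ===== PORT A =====
-- helper: is_injective(mapping) = (len(set(mapping.values())) == len(mapping))
def pv_is_injective (m : PySem.Dict Int Int) : Bool :=
  (PySem.Set.ofList m.values).length == m.size

def is_paut (adjacency_dict : List (Int × List Int)) (mapping : List (Int × Int)) : Bool :=
  let adj := PySem.Dict.ofList adjacency_dict
  let m := PySem.Dict.ofList mapping
  if m.size == 0 then false                 -- if not mapping: return False
  else if !(pv_is_injective m) then false   -- if not is_injective(mapping): return False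
  else
    -- for i, u in enumerate(domain): for v in domain[i+1:]: …  (early 'return False' = Bool all)
    let domain := m.keys
    (PySem.List.enumerate domain).all (fun p =>
      (PySem.List.slice domain (some (p.1 + 1)) none).all (fun v =>
        let u_mapped := (m.get? p.2).getD 0   -- mapping[u]; p.2 is a key, so get? is some
        let v_mapped := (m.get? v).getD 0     -- mapping[v]
        ((adj.getD p.2 []).contains v) == ((adj.getD u_mapped []).contains v_mapped)))

-- ===== PORT B =====
-- the loop of Source B: per node u (domain in reverse), compare
-- {mapping[v] for v in adjacency_dict.get(u, set()) if v in seen} with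
-- {w for w in adjacency_dict.get(mapping[u], set()) if w in seen_img}; early return False
def pvAltLoop (adj : PySem.Dict Int (List Int)) (m : PySem.Dict Int Int) :
    List Int → PySem.Set Int → PySem.Set Int → Bool
  | [], _, _ => true
  | u :: rest, seen, seenImg =>
    let mu := (m.get? u).getD 0
    let fwd := PySem.Set.ofList
      (((adj.getD u []).filter (fun v => PySem.Set.contains seen v)).map (fun v => (m.get? v).getD 0))
    let bwd := PySem.Set.ofList ((adj.getD mu []).filter (fun w => PySem.Set.contains seenImg w))
    if !(PySem.Set.equal fwd bwd) then false
    else pvAltLoop adj m rest (PySem.Set.add seen u) (PySem.Set.add seenImg mu)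

def is_paut_alt (adjacency_dict : List (Int × List Int)) (mapping : List (Int × Int)) : Bool :=
  let adj := PySem.Dict.ofList adjacency_dict
  let m := PySem.Dict.ofList mapping
  if m.size == 0 then false
  else if !((PySem.Set.ofList m.values).length == m.size) then false
  else pvAltLoop adj m m.keys.reverse PySem.Set.empty PySem.Set.empty

-- ===== PRECONDITION & SPEC =====
def Spec_is_paut (adjacency_dict : List (Int × List Int)) (mapping : List (Int × Int)) (out : Bool) : Prop := out = is_paut_alt adjacency_dict mapping
instance (adjacency_dict : List (Int × List Int)) (mapping : List (Int × Int)) (out : Bool) : Decidable (Spec_is_paut adjacency_dict mapping out) := by unfold Spec_is_paut; infer_instance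

-- ===== CLAIM (what is proved, stated in full; the proofs are below) =====
def Claim_equal_is_paut : Prop := ∀ (adjacency_dict : List (Int × List Int)) (mapping : List (Int × Int)), Dom_is_paut adjacency_dict mapping → Spec_is_paut adjacency_dict mapping (is_paut adjacency_dict mapping)

-- ===== LEMMAS AND PROOFS =====

-- mapping[x] as a total function (x is always a key where used)
def pvMval (m : PySem.Dict Int Int) (x : Int) : Int := (m.get? x).getD 0

-- the per-pair edge-preservation check both programs decide
def pvChk (adj : PySem.Dict Int (List Int)) (m : PySem.Dict Int Int) (a v : Int) : Bool :=
  ((adj.getD a []).contains v) == ((adj.getD (pvMval m a) []).contains (pvMval m v))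

-- A's nested loop, structurally: check u against everything after it, then recurse
def pvPairs (chk : Int → Int → Bool) : List Int → Bool
  | [] => true
  | u :: rest => rest.all (chk u) && pvPairs chk rest

-- the body of B's loop, as a named function of the two accumulated sets
def pvAltStep (adj : PySem.Dict Int (List Int)) (m : PySem.Dict Int Int)
    (u : Int) (S SI : PySem.Set Int) : Bool :=
  PySem.Set.equal
    (PySem.Set.ofList (((adj.getD u []).filter (fun v => PySem.Set.contains S v)).map (fun v => (m.get? v).getD 0)))
    (PySem.Set.ofList ((adj.getD ((m.get? u).getD 0) []).filter (fun w => PySem.Set.contains SI w)))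

-- A's enumerate/slice double loop is pvPairs
lemma pv_enum_slice_eq_pairs (d : List Int) (chk : Int → Int → Bool) :
    ∀ (l : List Int) (s : Nat), d.drop s = l →
    ((PySem.List.enumerate l (s : Int)).all (fun p =>
      (PySem.List.slice d (some (p.1 + 1)) none).all (fun v => chk p.2 v)))
      = pvPairs chk l := by
  intro l
  induction l with
  | nil => intro s _; simp [PySem.List.enumerate, pvPairs]
  | cons u rest ih =>
    intro s hs
    have hdrop : d.drop (s + 1) = rest := by
      rw [← List.tail_drop, hs]; rfl
    have hcast : (s : Int) + 1 = ((s + 1 : Nat) : Int) := by push_cast; ring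
    rw [PySem.List.enumerate_cons]
    simp only [List.all_cons]
    rw [pvPairs]
    congr 1
    · simp only [hcast, PySem.List.slice_from_natCast, hdrop]
    · rw [hcast, ih (s + 1) hdrop]

-- B's loop on xs ++ [u]: run it on xs, then do u's step with the accumulated sets
lemma pvAltLoop_append (adj : PySem.Dict Int (List Int)) (m : PySem.Dict Int Int) :
    ∀ (xs : List Int) (u : Int) (seen seenImg : PySem.Set Int),
    pvAltLoop adj m (xs ++ [u]) seen seenImg
      = (pvAltLoop adj m xs seen seenImg
         && pvAltStep adj m u (PySem.Set.update seen xs) (PySem.Set.update seenImg (xs.map (pvMval m)))) := by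
  intro xs
  induction xs with
  | nil =>
    intro u seen seenImg
    simp [pvAltLoop, pvAltStep, PySem.Set.update]
  | cons x xs ih =>
    intro u seen seenImg
    simp only [List.cons_append, pvAltLoop]
    cases h : PySem.Set.equal
      (PySem.Set.ofList (((adj.getD x []).filter (fun v => PySem.Set.contains seen v)).map (fun v => (m.get? v).getD 0)))
      (PySem.Set.ofList ((adj.getD ((m.get? x).getD 0) []).filter (fun w => PySem.Set.contains seenImg w))) <;>
      simp only [Bool.not_true, Bool.not_false, if_true, Bool.false_and]
    rw [ih]
    have h1 : PySem.Set.update (PySem.Set.add seen x) xs = PySem.Set.update seen (x :: xs) := by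
      rw [PySem.Set.update_cons]
    have h2 : PySem.Set.update (PySem.Set.add seenImg ((m.get? x).getD 0)) (xs.map (pvMval m))
        = PySem.Set.update seenImg ((x :: xs).map (pvMval m)) := by
      rw [List.map_cons, PySem.Set.update_cons]; rfl
    rw [h1, h2]
    simp

-- B's step at u with seen = rest (as sets) decides exactly A's inner pass over rest,
-- given that the mapping is injective on the keys
lemma pvStep_eq_all (adj : PySem.Dict Int (List Int)) (m : PySem.Dict Int Int)
    (hinj : ∀ a b, a ∈ m.keys → b ∈ m.keys → pvMval m a = pvMval m b → a = b)
    (u : Int) (rest : List Int) (hrest : ∀ v ∈ rest, v ∈ m.keys) :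
    pvAltStep adj m u (PySem.Set.ofList rest.reverse) (PySem.Set.ofList (rest.reverse.map (pvMval m)))
      = rest.all (pvChk adj m u) := by
  rw [Bool.eq_iff_iff]
  rw [pvAltStep, PySem.Set.equal_iff, List.all_eq_true]
  have hmem : ∀ (l : List Int) (x : Int), l.contains x = true ↔ x ∈ l := by
    intro l x; exact List.contains_iff_mem
  constructor
  · intro h v hv
    rw [pvChk, beq_iff_eq, Bool.eq_iff_iff, hmem, hmem]
    constructor
    · intro hvadj
      have := (h ((m.get? v).getD 0)).mp (by
        simp only [PySem.Set.mem_ofList, List.mem_map, List.mem_filter, List.mem_reverse,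
          PySem.Set.contains_eq_listContains, List.contains_iff_mem]
        exact ⟨v, ⟨hvadj, hv⟩, rfl⟩)
      simp only [PySem.Set.mem_ofList, List.mem_filter] at this
      exact this.1
    · intro hmadj
      have := (h ((m.get? v).getD 0)).mpr (by
        simp only [PySem.Set.mem_ofList, List.mem_map, List.mem_filter, List.mem_reverse,
          PySem.Set.contains_eq_listContains, List.contains_iff_mem, pvMval]
        exact ⟨hmadj, v, hv, rfl⟩)
      simp only [PySem.Set.mem_ofList, List.mem_map, List.mem_filter, List.mem_reverse,
        PySem.Set.contains_eq_listContains, List.contains_iff_mem] at this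
      obtain ⟨w, ⟨hwadj, hwrest⟩, hweq⟩ := this
      have hwv : w = v := hinj w v (hrest w hwrest) (hrest v hv) hweq
      exact hwv ▸ hwadj
  · intro h x
    simp only [PySem.Set.mem_ofList, List.mem_map, List.mem_filter, List.mem_reverse,
      PySem.Set.contains_eq_listContains, List.contains_iff_mem, pvMval]
    constructor
    · rintro ⟨v, ⟨hvadj, hvrest⟩, rfl⟩
      have hc := h v hvrest
      rw [pvChk, beq_iff_eq, Bool.eq_iff_iff, hmem, hmem] at hc
      exact ⟨hc.mp hvadj, v, hvrest, rfl⟩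
    · rintro ⟨hxadj, v, hvrest, rfl⟩
      have hc := h v hvrest
      rw [pvChk, beq_iff_eq, Bool.eq_iff_iff, hmem, hmem] at hc
      exact ⟨v, ⟨hc.mpr hxadj, hvrest⟩, rfl⟩

-- B's whole loop over the reversed key list is A's pairwise check
lemma pvLoop_eq_pairs (adj : PySem.Dict Int (List Int)) (m : PySem.Dict Int Int)
    (hinj : ∀ a b, a ∈ m.keys → b ∈ m.keys → pvMval m a = pvMval m b → a = b) :
    ∀ (l : List Int), (∀ x ∈ l, x ∈ m.keys) →
    pvAltLoop adj m l.reverse PySem.Set.empty PySem.Set.empty = pvPairs (pvChk adj m) l := by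
  intro l
  induction l with
  | nil => intro _; rfl
  | cons u rest ih =>
    intro hsub
    rw [List.reverse_cons, pvAltLoop_append, PySem.Set.update_empty, PySem.Set.update_empty,
      ih (fun x hx => hsub x (List.mem_cons_of_mem u hx)),
      pvStep_eq_all adj m hinj u rest (fun v hv => hsub v (List.mem_cons_of_mem u hv)),
      pvPairs, Bool.and_comm]

-- |set(xs)| = |xs| exactly when xs has no duplicates
lemma pv_length_ofList_eq_iff {xs : List Int} :
    (PySem.Set.ofList xs).length = xs.length ↔ xs.Nodup := by
  induction xs using List.reverseRecOn with
  | nil => simp [PySem.Set.ofList]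
  | append_singleton xs x ih =>
    rw [PySem.Set.ofList_append_singleton, PySem.Set.add_eq_ite]
    by_cases hx : x ∈ PySem.Set.ofList xs
    · have hx' : x ∈ xs := (PySem.Set.mem_ofList _ _).mp hx
      have hle := PySem.Set.length_ofList_le (xs := xs)
      have : ¬ (xs ++ [x]).Nodup := by simp [List.nodup_append, hx']
      simp only [hx, if_true, List.length_append, List.length_singleton, this, iff_false]
      omega
    · have hx' : x ∉ xs := fun h => hx ((PySem.Set.mem_ofList _ _).mpr h)
      simp only [hx, if_false, List.length_append, List.length_singleton,
        List.nodup_append, ← ih]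
      constructor
      · intro h
        refine ⟨by omega, by simp, ?_⟩
        intro a ha b hb
        simp only [List.mem_singleton] at hb
        subst hb
        exact fun heq => hx' (heq ▸ ha)
      · intro h; omega

-- ===== VERDICT (by name: the statement is the Claim_ definition above) =====
theorem is_paut_spec : Claim_equal_is_paut := by
  unfold Claim_equal_is_paut Spec_is_paut
  intro adjacency_dict mapping _
  simp only [is_paut, is_paut_alt, pv_is_injective]
  by_cases h0 : (PySem.Dict.ofList mapping).size == 0
  · simp [h0]
  · simp only [h0]
    cases hib : ((PySem.Set.ofList (PySem.Dict.ofList mapping).values).length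
        == (PySem.Dict.ofList mapping).size) with
    | false => simp
    | true =>
      simp only [Bool.not_true]
      set m := PySem.Dict.ofList mapping with hm
      set adj := PySem.Dict.ofList adjacency_dict with hadj
      have hnd : m.keys.Nodup := PySem.Dict.nodup_keys_ofList mapping
      have hsz : m.size = m.values.length := by
        simp [PySem.Dict.size, PySem.Dict.values]
      have hvnd : m.values.Nodup := by
        apply pv_length_ofList_eq_iff.mp
        have := beq_iff_eq.mp hib
        omega
      have hval : m.values = m.keys.map (fun k => m.getD k 0) :=
        PySem.Dict.values_eq_map_keys m hnd 0
      have hinj : ∀ a b, a ∈ m.keys → b ∈ m.keys → pvMval m a = pvMval m b → a = b := by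
        intro a b ha hb heq
        have hmapnd : (m.keys.map (fun k => m.getD k 0)).Nodup := hval ▸ hvnd
        have := (List.nodup_map_iff_inj_on hnd).mp hmapnd a ha b hb
        apply this
        simpa only [PySem.Dict.getD_eq_get?_getD] using heq
      have hA := pv_enum_slice_eq_pairs m.keys (pvChk adj m) m.keys 0 (by simp)
      rw [Nat.cast_zero] at hA
      have hB := pvLoop_eq_pairs adj m hinj m.keys (fun x hx => hx)
      exact hA.trans hB.symm
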